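-- pv_equiv track=rewrite | github.com/AdamZhouSE/pythonHomework | Code/CodeRecords/2199/60788/262604.py | f
-- ===== SOURCE A (Python) =====
-- def f(s):
--     ma=1
--     flag=False
--     for i in range(len(s)):
--         for j in range(i+1,len(s)+1):
--             if g(s,s[i:j])>=2 and f(s[i:j])+1>ma:
--                 ma=f(s[i:j])+1
--                 flag=True
--     if not flag:
--         return 1
--     return ma
--
-- def g(s,t):
--     if len(s)<len(t):
--         return 0
--     else:
--         m=0
--         for i in range(0,len(s)-len(t)+1):
--             if s[i:i+len(t)]==t:
--                 m+=1
--         return m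
-- ===== SOURCE B (Python) =====
-- def f(s):
--     # Memoized DP over distinct substrings: per-length window counters replace
--     # the inner scan g, and each distinct substring's value is computed once.
--     memo = {}
--
--     def solve(u):
--         if u in memo:
--             return memo[u]
--         best = 1
--         for L in range(1, len(u)):
--             cnt = {}
--             for i in range(len(u) - L + 1):
--                 t = u[i:i + L]
--                 cnt[t] = cnt.get(t, 0) + 1
--             for t, c in cnt.items():
--                 if c >= 2:
--                     v = solve(t) + 1
--                     if v > best:
--                         best = v
--         memo[u] = best
--         return best
--
--     return solve(s)
-- ===== Notes on version B (the rewrite author's own statement) =====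
-- stated objective: faster
-- what changed: B replaces A's recursion (which re-enumerates every (i,j) substring, re-scans the string with g for each candidate, and recomputes f twice per candidate) by a memoized DP: per-length hash counters find each distinct repeated substring once, and each distinct substring's chain value is computed once and cached; intended as asymptotically faster - a timing run measured B severalfold faster (2-6x) at the largest size both finished, and A timed out at n=64 where B still returned (so the ratio there could not be verified).
import Mathlib
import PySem

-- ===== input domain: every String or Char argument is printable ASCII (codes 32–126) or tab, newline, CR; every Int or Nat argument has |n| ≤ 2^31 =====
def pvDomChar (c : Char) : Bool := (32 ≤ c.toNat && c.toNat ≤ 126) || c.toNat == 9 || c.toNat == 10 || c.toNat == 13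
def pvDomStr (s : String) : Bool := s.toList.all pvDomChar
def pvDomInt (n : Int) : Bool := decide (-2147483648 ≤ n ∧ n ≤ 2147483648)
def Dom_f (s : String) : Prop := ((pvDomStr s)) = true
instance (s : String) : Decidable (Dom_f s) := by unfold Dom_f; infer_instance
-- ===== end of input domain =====

-- B memoizes the chain length on distinct substrings (DP with per-length window
-- counters) instead of A's re-scanning recursion; intended as faster (the timing
-- run measured B severalfold faster at the largest size both finished, and A
-- timed out at n=64 where B still returned).

-- ===== PORT A =====
def g (s t : String) : Int :=
  if PySem.Str.len s < PySem.Str.len t then 0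
  else
    (PySem.List.pyRange 0 (PySem.Str.len s - PySem.Str.len t + 1) 1).foldl
      (fun m i =>
        if PySem.Str.slice s (some i) (some (i + PySem.Str.len t)) == t then m + 1 else m) 0

-- termination fact for the recursion in `f` (cited by its decreasing_by):
-- a substring occurring at least twice in s is strictly shorter than s
theorem g_two_le_length_lt (s t : String) (h : 2 ≤ g s t) :
    t.toList.length < s.toList.length := by
  unfold g at h
  split at h
  · omega
  · rename_i hle
    rw [PySem.List.foldl_if_add_one] at h
    have hc := List.countP_le_length
      (p := fun i => PySem.Str.slice s (some i) (some (i + PySem.Str.len t)) == t)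
      (l := PySem.List.pyRange 0 (PySem.Str.len s - PySem.Str.len t + 1) 1)
    rw [PySem.List.length_pyRange_one] at hc
    rw [PySem.Str.len_eq, PySem.Str.len_eq] at h hc hle
    omega

mutual
-- Python `f`: the value f(s[i:j]) that the source computes twice (in the `and`
-- test and in the assignment) is computed once here and reused — same value.
def f (s : String) : Int :=
  let r := fOuter s (PySem.List.pyRange 0 (PySem.Str.len s) 1) 1 false
  if !r.2 then 1 else r.1
termination_by (s.toList.length + 1, 0, 0)

-- the `for i in range(len(s))` loop, state (ma, flag)
def fOuter (s : String) (is : List Int) (ma : Int) (flag : Bool) : Int × Bool :=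
  match is with
  | [] => (ma, flag)
  | i :: rest =>
    let r := fInner s i (PySem.List.pyRange (i + 1) (PySem.Str.len s + 1) 1) ma flag
    fOuter s rest r.1 r.2
termination_by (s.toList.length, 2, is.length)

-- the `for j in range(i+1, len(s)+1)` loop
def fInner (s : String) (i : Int) (js : List Int) (ma : Int) (flag : Bool) : Int × Bool :=
  match js with
  | [] => (ma, flag)
  | j :: rest =>
    let t := PySem.Str.slice s (some i) (some j)
    if h : 2 ≤ g s t then
      let v := f t + 1
      if ma < v then fInner s i rest v true
      else fInner s i rest ma flag
    else fInner s i rest ma flag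
termination_by (s.toList.length, 1, js.length)
decreasing_by
  · have := g_two_le_length_lt s (PySem.Str.slice s (some i) (some j)) h
    rcases Nat.lt_or_ge ((PySem.Str.slice s (some i) (some j)).toList.length + 1) s.toList.length with hlt | hge
    · exact Prod.Lex.left _ _ hlt
    · have heq : (PySem.Str.slice s (some i) (some j)).toList.length + 1 = s.toList.length := by omega
      rw [heq]
      exact Prod.Lex.right _ (Prod.Lex.left _ _ (by omega))
  · exact Prod.Lex.right _ (Prod.Lex.right _ (by simp))
  · exact Prod.Lex.right _ (Prod.Lex.right _ (by simp))
  · exact Prod.Lex.right _ (Prod.Lex.right _ (by simp))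
end

-- ===== PORT B =====
-- general clamp fact used by the termination lemma below
theorem clampIdx_cast_eq {n : Nat} {i : Int} (h0 : 0 ≤ i) (h1 : i ≤ n) :
    (PySem.List.clampIdx n i : Int) = i := by
  unfold PySem.List.clampIdx
  split
  · omega
  · push_cast; omega

-- Source B's `cnt`: the window counter for one length L (the two inner loops of solve
-- that build it, as a fold; no recursion inside)
def bCnt (u : String) (L : Int) : PySem.Dict String Int :=
  (PySem.List.pyRange 0 (PySem.Str.len u - L + 1) 1).foldl
    (fun d i =>
      let t := PySem.Str.slice u (some i) (some (i + L))
      d.insert t (d.getD t 0 + 1)) PySem.Dict.empty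

-- termination fact (cited by lenLoopB): keys of `bCnt u L`, 1 ≤ L < len u, are
-- strictly shorter than u
theorem bCnt_item_length_lt (u : String) (L : Int) (hL1 : 1 ≤ L) (hL : L < PySem.Str.len u) :
    ∀ p ∈ (bCnt u L).items, p.1.toList.length < u.toList.length := by
  intro p hp
  have hk : p.1 ∈ (bCnt u L).keys := by
    simp only [PySem.Dict.keys]
    exact List.mem_map_of_mem hp
  rw [bCnt, PySem.Dict.keys_foldl_insert_key _
    (fun i => PySem.Str.slice u (some i) (some (i + L)))
    (fun d i => d.getD (PySem.Str.slice u (some i) (some (i + L))) 0 + 1) _] at hk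
  rw [PySem.Set.mem_update] at hk
  rcases hk with hk | hk
  · simp [PySem.Dict.empty, PySem.Dict.keys] at hk
  · rcases List.mem_map.mp hk with ⟨i, hi, heq⟩
    rw [← heq]
    rw [PySem.List.mem_pyRange_one] at hi
    rw [PySem.Str.len_eq] at hL hi
    have hlen : (PySem.Str.slice u (some i) (some (i + L))).toList.length
        = PySem.List.clampIdx u.toList.length (i + L) - PySem.List.clampIdx u.toList.length i := by
      rw [PySem.Str.toList_slice, PySem.Chars.slice_eq_listSlice, PySem.List.length_slice]
    have h1 := clampIdx_cast_eq (n := u.toList.length) (i := i + L) (by omega) (by omega)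
    have h2 := clampIdx_cast_eq (n := u.toList.length) (i := i) (by omega) (by omega)
    omega

mutual
-- Source B's `solve`, with the memo dict threaded through explicitly
def solveB (u : String) (memo : PySem.Dict String Int) : Int × PySem.Dict String Int :=
  if memo.contains u then ((memo.get? u).getD 0, memo)
  else
    let r := lenLoopB u (PySem.List.pyRange 1 (PySem.Str.len u) 1) 1 memo
      (by intro L hL; rw [PySem.List.mem_pyRange_one] at hL; exact hL)
    (r.1, r.2.insert u r.1)
termination_by (u.toList.length + 1, 0, 0)

-- `for L in range(1, len(u))`, state (best, memo); hLs is a proof-only argument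
-- justifying termination, it carries no data
def lenLoopB (u : String) (Ls : List Int) (best : Int) (memo : PySem.Dict String Int)
    (hLs : ∀ L ∈ Ls, 1 ≤ L ∧ L < PySem.Str.len u) : Int × PySem.Dict String Int :=
  match Ls with
  | [] => (best, memo)
  | L :: rest =>
    let cnt := bCnt u L
    let r := itemLoopB u cnt.items best memo
      (bCnt_item_length_lt u L (hLs L List.mem_cons_self).1 (hLs L List.mem_cons_self).2)
    lenLoopB u rest r.1 r.2 (fun L' hL' => hLs L' (List.mem_cons_of_mem _ hL'))
termination_by (u.toList.length, 2, Ls.length)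

-- `for t, c in cnt.items()`; hit is a proof-only termination argument
def itemLoopB (u : String) (items : List (String × Int)) (best : Int)
    (memo : PySem.Dict String Int)
    (hit : ∀ p ∈ items, p.1.toList.length < u.toList.length) : Int × PySem.Dict String Int :=
  match items with
  | [] => (best, memo)
  | (t, c) :: rest =>
    if 2 ≤ c then
      let r := solveB t memo
      let v := r.1 + 1
      if best < v then
        itemLoopB u rest v r.2 (fun p hp => hit p (List.mem_cons_of_mem _ hp))
      else
        itemLoopB u rest best r.2 (fun p hp => hit p (List.mem_cons_of_mem _ hp))
    else itemLoopB u rest best memo (fun p hp => hit p (List.mem_cons_of_mem _ hp))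
termination_by (u.toList.length, 1, items.length)
decreasing_by
  · have ht : t.toList.length < u.toList.length := hit (t, c) List.mem_cons_self
    rcases Nat.lt_or_ge (t.toList.length + 1) u.toList.length with hlt | hge
    · exact Prod.Lex.left _ _ hlt
    · have heq : t.toList.length + 1 = u.toList.length := by omega
      rw [heq]
      exact Prod.Lex.right _ (Prod.Lex.left _ _ (by omega))
  · exact Prod.Lex.right _ (Prod.Lex.right _ (by simp))
  · exact Prod.Lex.right _ (Prod.Lex.right _ (by simp))
  · exact Prod.Lex.right _ (Prod.Lex.right _ (by simp))
end

def f_alt (s : String) : Int := (solveB s PySem.Dict.empty).1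

-- ===== PRECONDITION & SPEC =====
def Spec_f (s : String) (out : Int) : Prop := out = f_alt s
instance (s : String) (out : Int) : Decidable (Spec_f s out) := by unfold Spec_f; infer_instance

-- ===== CLAIM (what is proved, stated in full; the proofs are below) =====
def Claim_equal_f : Prop := ∀ (s : String), Dom_f s → Spec_f s (f s)

-- ===== LEMMAS AND PROOFS =====

def RepSub (s t : String) : Prop := t.toList ≠ [] ∧ 2 ≤ g s t

theorem g_eq_countP (s t : String) (h : ¬ PySem.Str.len s < PySem.Str.len t) :
    g s t = ((PySem.List.pyRange 0 (PySem.Str.len s - PySem.Str.len t + 1) 1).countP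
      (fun i => PySem.Str.slice s (some i) (some (i + PySem.Str.len t)) == t) : Int) := by
  unfold g
  rw [if_neg h, PySem.List.foldl_if_add_one]
  ring

theorem fInner_nil (s : String) (i ma : Int) (flag : Bool) :
    fInner s i [] ma flag = (ma, flag) := by rw [fInner]

theorem fInner_cons (s : String) (i j : Int) (rest : List Int) (ma : Int) (flag : Bool) :
    fInner s i (j :: rest) ma flag =
      if 2 ≤ g s (PySem.Str.slice s (some i) (some j)) then
        (if ma < f (PySem.Str.slice s (some i) (some j)) + 1 then
          fInner s i rest (f (PySem.Str.slice s (some i) (some j)) + 1) true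
        else fInner s i rest ma flag)
      else fInner s i rest ma flag := by
  rw [fInner]; simp

theorem fInner_spec (s : String) (i : Int) (js : List Int) (ma : Int) (flag : Bool) :
    ma ≤ (fInner s i js ma flag).1 ∧
    (∀ j ∈ js, 2 ≤ g s (PySem.Str.slice s (some i) (some j)) →
      f (PySem.Str.slice s (some i) (some j)) + 1 ≤ (fInner s i js ma flag).1) ∧
    ((fInner s i js ma flag).1 = ma ∨ ∃ j ∈ js, 2 ≤ g s (PySem.Str.slice s (some i) (some j)) ∧
      (fInner s i js ma flag).1 = f (PySem.Str.slice s (some i) (some j)) + 1) ∧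
    ((fInner s i js ma flag).2 = (flag || decide (ma < (fInner s i js ma flag).1))) := by
  induction js generalizing ma flag with
  | nil => simp [fInner_nil]
  | cons j rest ih =>
    rw [fInner_cons]
    by_cases hg : 2 ≤ g s (PySem.Str.slice s (some i) (some j))
    · by_cases hv : ma < f (PySem.Str.slice s (some i) (some j)) + 1
      · rw [if_pos hg, if_pos hv]
        obtain ⟨i1, i2, i3, i4⟩ := ih (f (PySem.Str.slice s (some i) (some j)) + 1) true
        refine ⟨by omega, ?_, ?_, ?_⟩
        · intro j' hj' hg'
          rcases List.mem_cons.mp hj' with rfl | hj'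
          · exact i1
          · exact i2 j' hj' hg'
        · rcases i3 with h | ⟨j', hj', hg', he⟩
          · exact Or.inr ⟨j, List.mem_cons_self, hg, h⟩
          · exact Or.inr ⟨j', List.mem_cons_of_mem _ hj', hg', he⟩
        · rw [i4]
          simp only [Bool.true_or]
          have : ma < (fInner s i rest (f (PySem.Str.slice s (some i) (some j)) + 1) true).1 := by omega
          simp [this]
      · rw [if_pos hg, if_neg hv]
        obtain ⟨i1, i2, i3, i4⟩ := ih ma flag
        refine ⟨i1, ?_, ?_, i4⟩
        · intro j' hj' hg'
          rcases List.mem_cons.mp hj' with rfl | hj'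
          · omega
          · exact i2 j' hj' hg'
        · rcases i3 with h | ⟨j', hj', hg', he⟩
          · exact Or.inl h
          · exact Or.inr ⟨j', List.mem_cons_of_mem _ hj', hg', he⟩
    · rw [if_neg hg]
      obtain ⟨i1, i2, i3, i4⟩ := ih ma flag
      refine ⟨i1, ?_, ?_, i4⟩
      · intro j' hj' hg'
        rcases List.mem_cons.mp hj' with rfl | hj'
        · exact absurd hg' hg
        · exact i2 j' hj' hg'
      · rcases i3 with h | ⟨j', hj', hg', he⟩
        · exact Or.inl h
        · exact Or.inr ⟨j', List.mem_cons_of_mem _ hj', hg', he⟩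

theorem fOuter_nil (s : String) (ma : Int) (flag : Bool) :
    fOuter s [] ma flag = (ma, flag) := by rw [fOuter]

theorem fOuter_cons (s : String) (i : Int) (rest : List Int) (ma : Int) (flag : Bool) :
    fOuter s (i :: rest) ma flag =
      fOuter s rest (fInner s i (PySem.List.pyRange (i + 1) (PySem.Str.len s + 1) 1) ma flag).1
        (fInner s i (PySem.List.pyRange (i + 1) (PySem.Str.len s + 1) 1) ma flag).2 := by
  rw [fOuter]

theorem fOuter_spec (s : String) (is : List Int) (ma : Int) (flag : Bool) :
    ma ≤ (fOuter s is ma flag).1 ∧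
    (∀ i ∈ is, ∀ j ∈ PySem.List.pyRange (i + 1) (PySem.Str.len s + 1) 1,
      2 ≤ g s (PySem.Str.slice s (some i) (some j)) →
      f (PySem.Str.slice s (some i) (some j)) + 1 ≤ (fOuter s is ma flag).1) ∧
    ((fOuter s is ma flag).1 = ma ∨ ∃ i ∈ is, ∃ j ∈ PySem.List.pyRange (i + 1) (PySem.Str.len s + 1) 1,
      2 ≤ g s (PySem.Str.slice s (some i) (some j)) ∧
      (fOuter s is ma flag).1 = f (PySem.Str.slice s (some i) (some j)) + 1) ∧
    ((fOuter s is ma flag).2 = (flag || decide (ma < (fOuter s is ma flag).1))) := by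
  induction is generalizing ma flag with
  | nil => simp [fOuter_nil]
  | cons i rest ih =>
    rw [fOuter_cons]
    obtain ⟨j1, j2, j3, j4⟩ := fInner_spec s i (PySem.List.pyRange (i + 1) (PySem.Str.len s + 1) 1) ma flag
    set r := fInner s i (PySem.List.pyRange (i + 1) (PySem.Str.len s + 1) 1) ma flag with hr
    obtain ⟨i1, i2, i3, i4⟩ := ih r.1 r.2
    refine ⟨by omega, ?_, ?_, ?_⟩
    · intro i' hi' j hj hg
      rcases List.mem_cons.mp hi' with rfl | hi'
      · exact le_trans (j2 j hj hg) i1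
      · exact i2 i' hi' j hj hg
    · rcases i3 with h | ⟨i', hi', j, hj, hg, he⟩
      · rcases j3 with h' | ⟨j, hj, hg, he⟩
        · exact Or.inl (h.trans h')
        · exact Or.inr ⟨i, List.mem_cons_self, j, hj, hg, h.trans he⟩
      · exact Or.inr ⟨i', List.mem_cons_of_mem _ hi', j, hj, hg, he⟩
    · generalize hF : fOuter s rest r.1 r.2 = F at i1 i4 ⊢
      rw [i4, j4]
      cases flag with
      | true => simp
      | false =>
        simp only [Bool.false_or]
        by_cases h1 : ma < r.1
        · have h2 : ma < F.1 := by omega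
          simp [h1, h2]
        · have he : r.1 = ma := by omega
          rw [he]
          simp

theorem f_eq_loop (s : String) :
    f s = (fOuter s (PySem.List.pyRange 0 (PySem.Str.len s) 1) 1 false).1 := by
  rw [f]
  obtain ⟨i1, _, _, i4⟩ := fOuter_spec s (PySem.List.pyRange 0 (PySem.Str.len s) 1) 1 false
  set r := fOuter s (PySem.List.pyRange 0 (PySem.Str.len s) 1) 1 false with hr
  rw [i4]
  by_cases h : (1 : Int) < r.1
  · simp [h]
  · have : r.1 = 1 := by omega
    simp [this]

theorem f_ge_one (s : String) : 1 ≤ f s := by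
  rw [f_eq_loop]
  exact (fOuter_spec s (PySem.List.pyRange 0 (PySem.Str.len s) 1) 1 false).1

theorem g_two_exists (s t : String) (h : 2 ≤ g s t) :
    ∃ i, 0 ≤ i ∧ i + PySem.Str.len t ≤ PySem.Str.len s ∧
      PySem.Str.slice s (some i) (some (i + PySem.Str.len t)) = t := by
  have hle : ¬ PySem.Str.len s < PySem.Str.len t := by
    intro hlt
    unfold g at h
    rw [if_pos hlt] at h
    omega
  rw [g_eq_countP s t hle] at h
  have hp : 0 < (PySem.List.pyRange 0 (PySem.Str.len s - PySem.Str.len t + 1) 1).countP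
      (fun i => PySem.Str.slice s (some i) (some (i + PySem.Str.len t)) == t) := by omega
  obtain ⟨i, hi, hpi⟩ := List.countP_pos_iff.mp hp
  rw [PySem.List.mem_pyRange_one] at hi
  exact ⟨i, hi.1, by omega, by simpa using hpi⟩

theorem slice_len (s : String) (a b : Int) (h0 : 0 ≤ a) (hab : a ≤ b)
    (hb : b ≤ PySem.Str.len s) :
    ((PySem.Str.slice s (some a) (some b)).toList.length : Int) = b - a := by
  rw [PySem.Str.len_eq] at hb
  have hlen : (PySem.Str.slice s (some a) (some b)).toList.length
      = PySem.List.clampIdx s.toList.length b - PySem.List.clampIdx s.toList.length a := by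
    rw [PySem.Str.toList_slice, PySem.Chars.slice_eq_listSlice, PySem.List.length_slice]
  have h1 := clampIdx_cast_eq (n := s.toList.length) (i := b) (by omega) (by omega)
  have h2 := clampIdx_cast_eq (n := s.toList.length) (i := a) (by omega) (by omega)
  omega

theorem f_ub (s t : String) (h : RepSub s t) : f t + 1 ≤ f s := by
  obtain ⟨hne, hg⟩ := h
  obtain ⟨i, hi0, hile, heq⟩ := g_two_exists s t hg
  have hlt1 : (1 : Int) ≤ PySem.Str.len t := by
    rw [PySem.Str.len_eq]
    have := List.length_pos_iff.mpr hne
    omega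
  rw [f_eq_loop s]
  obtain ⟨_, i2, _, _⟩ := fOuter_spec s (PySem.List.pyRange 0 (PySem.Str.len s) 1) 1 false
  have hmi : i ∈ PySem.List.pyRange 0 (PySem.Str.len s) 1 := by
    rw [PySem.List.mem_pyRange_one]; omega
  have hmj : i + PySem.Str.len t ∈ PySem.List.pyRange (i + 1) (PySem.Str.len s + 1) 1 := by
    rw [PySem.List.mem_pyRange_one]; omega
  have := i2 i hmi (i + PySem.Str.len t) hmj (by rw [heq]; exact hg)
  rw [heq] at this
  exact this

theorem f_attain (s : String) : f s = 1 ∨ ∃ t, RepSub s t ∧ f s = f t + 1 := by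
  rw [f_eq_loop s]
  obtain ⟨_, _, i3, _⟩ := fOuter_spec s (PySem.List.pyRange 0 (PySem.Str.len s) 1) 1 false
  rcases i3 with h | ⟨i, hi, j, hj, hg, he⟩
  · exact Or.inl h
  · refine Or.inr ⟨PySem.Str.slice s (some i) (some j), ⟨?_, hg⟩, he⟩
    rw [PySem.List.mem_pyRange_one] at hi hj
    have := slice_len s i j (by omega) (by omega) (by omega)
    intro hnil
    rw [hnil] at this
    simp at this
    omega

def windows (u : String) (L : Int) : List String :=
  (PySem.List.pyRange 0 (PySem.Str.len u - L + 1) 1).map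
    (fun i => PySem.Str.slice u (some i) (some (i + L)))

theorem bCnt_eq_counter (u : String) (L : Int) :
    bCnt u L = PySem.Dict.counter (windows u L) := by
  rw [bCnt, windows, ← PySem.Dict.foldl_insert_getD_add_one_eq_counter, List.foldl_map]

theorem mem_windows_len (u : String) (L : Int) (hL1 : 1 ≤ L) (_hL : L < PySem.Str.len u)
    (t : String) (ht : t ∈ windows u L) : PySem.Str.len t = L := by
  rw [windows] at ht
  rcases List.mem_map.mp ht with ⟨i, hi, heq⟩
  rw [PySem.List.mem_pyRange_one] at hi
  rw [← heq, PySem.Str.len_eq]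
  have := slice_len u i (i + L) (by omega) (by omega) (by omega)
  omega

theorem windows_nonnil (u : String) (L : Int) (hL1 : 1 ≤ L) (hL : L < PySem.Str.len u)
    (t : String) (ht : t ∈ windows u L) : t.toList ≠ [] := by
  have := mem_windows_len u L hL1 hL t ht
  rw [PySem.Str.len_eq] at this
  intro hnil
  rw [hnil] at this
  simp at this
  omega

theorem windows_count_eq_g (u : String) (L : Int) (hL1 : 1 ≤ L) (hL : L < PySem.Str.len u)
    (t : String) (ht : t ∈ windows u L) : ((windows u L).count t : Int) = g u t := by
  have hlt : PySem.Str.len t = L := mem_windows_len u L hL1 hL t ht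
  rw [g_eq_countP u t (by omega), hlt]
  rw [windows, List.count_eq_countP, List.countP_map]
  congr 1

theorem rep_mem_windows (u t : String) (h : RepSub u t) :
    t ∈ windows u (PySem.Str.len t) ∧ 1 ≤ PySem.Str.len t ∧ PySem.Str.len t < PySem.Str.len u := by
  obtain ⟨hne, hg⟩ := h
  obtain ⟨i, hi0, hile, heq⟩ := g_two_exists u t hg
  have h1 : (1 : Int) ≤ PySem.Str.len t := by
    rw [PySem.Str.len_eq]
    have := List.length_pos_iff.mpr hne
    omega
  have h2 : PySem.Str.len t < PySem.Str.len u := by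
    have := g_two_le_length_lt u t hg
    rw [PySem.Str.len_eq, PySem.Str.len_eq]
    omega
  refine ⟨?_, h1, h2⟩
  rw [windows]
  refine List.mem_map.mpr ⟨i, ?_, heq⟩
  rw [PySem.List.mem_pyRange_one]
  omega

def MemoOK (d : PySem.Dict String Int) : Prop :=
  ∀ k v, d.get? k = some v → v = f k

theorem itemLoopB_nil (u : String) (best : Int) (memo : PySem.Dict String Int) (hit) :
    itemLoopB u [] best memo hit = (best, memo) := by rw [itemLoopB]

theorem itemLoopB_cons (u : String) (t : String) (c : Int) (rest : List (String × Int))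
    (best : Int) (memo : PySem.Dict String Int) (hit) :
    itemLoopB u ((t, c) :: rest) best memo hit =
      if 2 ≤ c then
        (if best < (solveB t memo).1 + 1 then
          itemLoopB u rest ((solveB t memo).1 + 1) (solveB t memo).2
            (fun p hp => hit p (List.mem_cons_of_mem _ hp))
        else
          itemLoopB u rest best (solveB t memo).2
            (fun p hp => hit p (List.mem_cons_of_mem _ hp)))
      else itemLoopB u rest best memo (fun p hp => hit p (List.mem_cons_of_mem _ hp)) := by
  rw [itemLoopB]

theorem itemLoopB_spec (u : String)
    (H : ∀ t m, t.toList.length < u.toList.length → MemoOK m →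
      (solveB t m).1 = f t ∧ MemoOK (solveB t m).2)
    (items : List (String × Int)) (best : Int) (memo : PySem.Dict String Int)
    (hit : ∀ p ∈ items, p.1.toList.length < u.toList.length) (hm : MemoOK memo) :
    best ≤ (itemLoopB u items best memo hit).1 ∧
    MemoOK (itemLoopB u items best memo hit).2 ∧
    (∀ t c, (t, c) ∈ items → 2 ≤ c → f t + 1 ≤ (itemLoopB u items best memo hit).1) ∧
    ((itemLoopB u items best memo hit).1 = best ∨
      ∃ t c, (t, c) ∈ items ∧ 2 ≤ c ∧ (itemLoopB u items best memo hit).1 = f t + 1) := by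
  induction items generalizing best memo with
  | nil =>
    simp only [itemLoopB_nil]
    refine ⟨le_refl _, hm, ?_, ?_⟩
    · simp
    · left
      trivial
  | cons p rest ih =>
    obtain ⟨t, c⟩ := p
    rw [itemLoopB_cons]
    by_cases h2 : 2 ≤ c
    · have hsolve := H t memo (hit (t, c) List.mem_cons_self) hm
      by_cases hv : best < (solveB t memo).1 + 1
      · rw [if_pos h2, if_pos hv]
        obtain ⟨i1, i2, i3, i4⟩ := ih ((solveB t memo).1 + 1) (solveB t memo).2
          (fun p hp => hit p (List.mem_cons_of_mem _ hp)) hsolve.2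
        refine ⟨by omega, i2, ?_, ?_⟩
        · intro t' c' ht' hc'
          rcases List.mem_cons.mp ht' with heq | ht'
          · obtain ⟨rfl, rfl⟩ := Prod.mk.inj heq
            rw [← hsolve.1]
            exact i1
          · exact i3 t' c' ht' hc'
        · rcases i4 with h | ⟨t', c', ht', hc', he⟩
          · exact Or.inr ⟨t, c, List.mem_cons_self, h2, by rw [h, hsolve.1]⟩
          · exact Or.inr ⟨t', c', List.mem_cons_of_mem _ ht', hc', he⟩
      · rw [if_pos h2, if_neg hv]
        obtain ⟨i1, i2, i3, i4⟩ := ih best (solveB t memo).2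
          (fun p hp => hit p (List.mem_cons_of_mem _ hp)) hsolve.2
        refine ⟨i1, i2, ?_, ?_⟩
        · intro t' c' ht' hc'
          rcases List.mem_cons.mp ht' with heq | ht'
          · obtain ⟨rfl, rfl⟩ := Prod.mk.inj heq
            rw [← hsolve.1] at *
            omega
          · exact i3 t' c' ht' hc'
        · rcases i4 with h | ⟨t', c', ht', hc', he⟩
          · exact Or.inl h
          · exact Or.inr ⟨t', c', List.mem_cons_of_mem _ ht', hc', he⟩
    · rw [if_neg h2]
      obtain ⟨i1, i2, i3, i4⟩ := ih best memo
        (fun p hp => hit p (List.mem_cons_of_mem _ hp)) hm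
      refine ⟨i1, i2, ?_, ?_⟩
      · intro t' c' ht' hc'
        rcases List.mem_cons.mp ht' with heq | ht'
        · obtain ⟨rfl, rfl⟩ := Prod.mk.inj heq
          exact absurd hc' h2
        · exact i3 t' c' ht' hc'
      · rcases i4 with h | ⟨t', c', ht', hc', he⟩
        · exact Or.inl h
        · exact Or.inr ⟨t', c', List.mem_cons_of_mem _ ht', hc', he⟩

theorem lenLoopB_nil (u : String) (best : Int) (memo : PySem.Dict String Int) (hLs) :
    lenLoopB u [] best memo hLs = (best, memo) := by rw [lenLoopB]

theorem lenLoopB_cons (u : String) (L : Int) (rest : List Int) (best : Int)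
    (memo : PySem.Dict String Int) (hLs) :
    lenLoopB u (L :: rest) best memo hLs =
      lenLoopB u rest
        (itemLoopB u (bCnt u L).items best memo
          (bCnt_item_length_lt u L (hLs L List.mem_cons_self).1 (hLs L List.mem_cons_self).2)).1
        (itemLoopB u (bCnt u L).items best memo
          (bCnt_item_length_lt u L (hLs L List.mem_cons_self).1 (hLs L List.mem_cons_self).2)).2
        (fun L' hL' => hLs L' (List.mem_cons_of_mem _ hL')) := by
  rw [lenLoopB]

theorem lenLoopB_spec (u : String)
    (H : ∀ t m, t.toList.length < u.toList.length → MemoOK m →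
      (solveB t m).1 = f t ∧ MemoOK (solveB t m).2)
    (Ls : List Int) (best : Int) (memo : PySem.Dict String Int)
    (hLs : ∀ L ∈ Ls, 1 ≤ L ∧ L < PySem.Str.len u) (hm : MemoOK memo) :
    best ≤ (lenLoopB u Ls best memo hLs).1 ∧
    MemoOK (lenLoopB u Ls best memo hLs).2 ∧
    (∀ t, RepSub u t → PySem.Str.len t ∈ Ls → f t + 1 ≤ (lenLoopB u Ls best memo hLs).1) ∧
    ((lenLoopB u Ls best memo hLs).1 = best ∨
      ∃ t, RepSub u t ∧ (lenLoopB u Ls best memo hLs).1 = f t + 1) := by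
  induction Ls generalizing best memo with
  | nil =>
    simp only [lenLoopB_nil]
    refine ⟨le_refl _, hm, ?_, ?_⟩
    · simp
    · left; trivial
  | cons L rest ih =>
    rw [lenLoopB_cons]
    have hL1 := (hLs L List.mem_cons_self).1
    have hL2 := (hLs L List.mem_cons_self).2
    have hitems : (bCnt u L).items
        = (PySem.Set.ofList (windows u L)).map
            (fun k => (k, ((windows u L).count k : Int))) := by
      rw [bCnt_eq_counter, PySem.Dict.items_counter]
    obtain ⟨j1, j2, j3, j4⟩ := itemLoopB_spec u H (bCnt u L).items best memo
      (bCnt_item_length_lt u L (hLs L List.mem_cons_self).1 (hLs L List.mem_cons_self).2) hm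
    obtain ⟨i1, i2, i3, i4⟩ := ih _ _ (fun L' hL' => hLs L' (List.mem_cons_of_mem _ hL')) j2
    refine ⟨by omega, i2, ?_, ?_⟩
    · intro t hrep hmem
      rcases List.mem_cons.mp hmem with hL | hmem
      · -- len t = L : t is counted in this round
        obtain ⟨hw, _, _⟩ := rep_mem_windows u t hrep
        rw [hL] at hw
        have hcnt : ((windows u L).count t : Int) = g u t :=
          windows_count_eq_g u L hL1 hL2 t hw
        have hmemitems : (t, ((windows u L).count t : Int)) ∈ (bCnt u L).items := by
          rw [hitems]
          exact List.mem_map.mpr ⟨t, (PySem.Set.mem_ofList _ _).mpr hw, rfl⟩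
        have := j3 t _ hmemitems (by rw [hcnt]; exact hrep.2)
        omega
      · exact i3 t hrep hmem
    · rcases i4 with h | ⟨t, hrep, he⟩
      · rw [h]
        rcases j4 with h' | ⟨t, c, htc, hc, he⟩
        · exact Or.inl h'
        · -- t is a key of the counter for length L with count ≥ 2, so RepSub u t
          rw [hitems] at htc
          rcases List.mem_map.mp htc with ⟨k, hk, hkeq⟩
          obtain ⟨hk1, hk2⟩ := Prod.mk.inj hkeq
          have hw := (PySem.Set.mem_ofList _ _).mp hk
          rw [hk1] at hw hk2
          have hcg := windows_count_eq_g u L hL1 hL2 t hw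
          refine Or.inr ⟨t, ⟨windows_nonnil u L hL1 hL2 t hw, by omega⟩, he⟩
      · exact Or.inr ⟨t, hrep, he⟩

theorem solveB_eq (u : String) (memo : PySem.Dict String Int) :
    solveB u memo =
      if memo.contains u then ((memo.get? u).getD 0, memo)
      else
        ((lenLoopB u (PySem.List.pyRange 1 (PySem.Str.len u) 1) 1 memo
            (by intro L hL; rw [PySem.List.mem_pyRange_one] at hL; exact hL)).1,
         (lenLoopB u (PySem.List.pyRange 1 (PySem.Str.len u) 1) 1 memo
            (by intro L hL; rw [PySem.List.mem_pyRange_one] at hL; exact hL)).2.insert u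
           (lenLoopB u (PySem.List.pyRange 1 (PySem.Str.len u) 1) 1 memo
            (by intro L hL; rw [PySem.List.mem_pyRange_one] at hL; exact hL)).1) := by
  rw [solveB]

theorem solveB_correct : ∀ n (u : String) (memo : PySem.Dict String Int),
    u.toList.length ≤ n → MemoOK memo →
    (solveB u memo).1 = f u ∧ MemoOK (solveB u memo).2 := by
  intro n
  induction n using Nat.strong_induction_on with
  | _ n ih =>
  intro u memo hn hm
  have H : ∀ t m, t.toList.length < u.toList.length → MemoOK m →
      (solveB t m).1 = f t ∧ MemoOK (solveB t m).2 := by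
    intro t m ht hmm
    exact ih t.toList.length (by omega) t m le_rfl hmm
  rw [solveB_eq]
  by_cases hc : memo.contains u
  · rw [if_pos hc]
    rw [PySem.Dict.contains_eq_isSome_get?] at hc
    obtain ⟨v, hv⟩ := Option.isSome_iff_exists.mp hc
    refine ⟨?_, hm⟩
    simp only [hv, Option.getD_some]
    exact hm u v hv
  · rw [if_neg hc]
    obtain ⟨l1, l2, l3, l4⟩ := lenLoopB_spec u H (PySem.List.pyRange 1 (PySem.Str.len u) 1) 1 memo
      (by intro L hL; rw [PySem.List.mem_pyRange_one] at hL; exact hL) hm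
    set r := lenLoopB u (PySem.List.pyRange 1 (PySem.Str.len u) 1) 1 memo
      (by intro L hL; rw [PySem.List.mem_pyRange_one] at hL; exact hL) with hr
    have hfu : r.1 = f u := by
      apply le_antisymm
      · rcases l4 with h | ⟨t, hrep, he⟩
        · rw [h]; exact f_ge_one u
        · rw [he]; exact f_ub u t hrep
      · rcases f_attain u with h | ⟨t, hrep, he⟩
        · rw [h]; exact l1
        · rw [he]
          apply l3 t hrep
          rw [PySem.List.mem_pyRange_one]
          obtain ⟨_, h1, h2⟩ := rep_mem_windows u t hrep
          omega
    refine ⟨hfu, ?_⟩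
    intro k v hk
    by_cases hku : k = u
    · subst hku
      rw [PySem.Dict.get?_insert_self] at hk
      cases hk
      rw [hfu]
    · rw [PySem.Dict.get?_insert_of_ne _ _ hku] at hk
      exact l2 k v hk

theorem f_alt_eq_f (s : String) : f_alt s = f s := by
  have h := solveB_correct s.toList.length s PySem.Dict.empty le_rfl
    (by intro k v hk; rw [PySem.Dict.get?_empty] at hk; cases hk)
  exact h.1

-- ===== VERDICT (by name: the statement is the Claim_ definition above) =====
theorem f_spec : Claim_equal_f := by
  intro s _
  unfold Spec_f
  exact (f_alt_eq_f s).symm
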